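-- pv_equiv track=rewrite | github.com/klein203/JupyterNotebook | cmu15-112/week8/hw8.py | friendsOfFriends
-- ===== SOURCE A (Python) =====
-- def friendsOfFriends(d):
--     friendsOfFriends = dict()
--     for person in d:
--         friendsOfPerson = d[person]
--         fof = set()
--         for f in friendsOfPerson:
--             [fof.add(x) for x in d[f] if x != person and x not in friendsOfPerson]
--
--         friendsOfFriends[person] = fof
--
--     return friendsOfFriends
-- ===== SOURCE B (Python) =====
-- def friendsOfFriends(d):
--     # Breadth-first search truncated to depth 2: the friends-of-friends of a
--     # person are exactly the nodes first discovered at BFS level 2 from that person.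
--     def bfsLevel2(src):
--         visited = {src}
--         frontier = [src]
--         for _depth in range(2):
--             nxt = []
--             for u in frontier:
--                 for v in d[u]:
--                     if v not in visited:
--                         visited.add(v)
--                         nxt.append(v)
--             frontier = nxt
--         return set(frontier)
--     return {person: bfsLevel2(person) for person in d}
-- ===== Notes on version B (the rewrite author's own statement) =====
-- stated objective: alternative
-- what changed: B runs a generic breadth-first search truncated to depth 2 from each person (visited set + frontier lists, two rounds) and returns the final frontier as the friends-of-friends set, instead of A's per-person union of the friends' friend lists filtered inline against the person and the direct-friend list.
import Mathlib
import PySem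

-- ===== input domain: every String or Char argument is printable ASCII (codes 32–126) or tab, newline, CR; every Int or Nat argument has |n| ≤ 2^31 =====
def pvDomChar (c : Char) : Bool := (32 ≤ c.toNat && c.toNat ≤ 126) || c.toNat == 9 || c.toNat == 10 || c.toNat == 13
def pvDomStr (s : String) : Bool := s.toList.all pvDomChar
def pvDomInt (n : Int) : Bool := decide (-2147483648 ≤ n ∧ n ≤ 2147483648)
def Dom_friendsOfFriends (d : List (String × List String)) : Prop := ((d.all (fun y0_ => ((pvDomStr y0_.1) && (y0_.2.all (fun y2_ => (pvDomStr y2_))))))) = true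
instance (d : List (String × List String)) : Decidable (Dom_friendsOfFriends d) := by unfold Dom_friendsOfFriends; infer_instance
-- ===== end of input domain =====

-- B computes each person's friends-of-friends by a generic breadth-first search truncated to
-- depth 2 (visited set + frontier lists), instead of A's per-person filtered union of the
-- friends' friend lists (objective: alternative algorithm, same asymptotic cost).

-- ===== PORT A =====
-- Literal port of A: iterate over the dict's keys; for each person fold over their friends,
-- adding each friend-of-friend to a set only if it is not the person and not a direct friend.
-- d[f] is ported as the total 'getD _ []': under Pre_ every looked-up friend is a key, so this is exact.
def friendsOfFriends (d : List (String × List String)) : List (String × List String) :=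
  let D := PySem.Dict.ofList d
  (D.keys.foldl (fun acc person =>
      let friendsOfPerson := D.getD person []
      let fof := friendsOfPerson.foldl (fun s f =>
          (D.getD f []).foldl (fun s x =>
              if x ≠ person ∧ x ∉ friendsOfPerson then PySem.Set.add s x else s) s)
        PySem.Set.empty
      acc.insert person fof)
    PySem.Dict.empty).items

-- ===== PORT B =====
-- Literal port of B: per person a BFS truncated to depth 2 — state (visited, frontier),
-- two rounds (range(2)) of: scan the frontier, append each undiscovered neighbour to the
-- next frontier and mark it visited; the final frontier, as a set, is the answer.
-- The dict comprehension '{p: bfs(p) for p in d}' is the map over D.keys (keys are distinct,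
-- so the built dict's items are exactly this list, in key order).  d[u] ports as getD u [].
def friendsOfFriends_alt (d : List (String × List String)) : List (String × List String) :=
  let D := PySem.Dict.ofList d
  D.keys.map (fun person =>
    (person,
      PySem.Set.ofList
        (((PySem.List.pyRange 0 2 1).foldl (fun (st : PySem.Set String × List String) _ =>
            st.2.foldl (fun (st2 : PySem.Set String × List String) u =>
                (D.getD u []).foldl (fun (st3 : PySem.Set String × List String) v =>
                    if st3.1.contains v then st3
                    else (PySem.Set.add st3.1 v, st3.2 ++ [v])) st2)
              (st.1, ([] : List String)))
          (PySem.Set.add PySem.Set.empty person, [person])).2)))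

-- ===== PRECONDITION & SPEC =====
-- A raises KeyError when some listed friend is not a key of the dict; Pre_ excludes exactly those inputs.
def Pre_friendsOfFriends (d : List (String × List String)) : Prop :=
  ∀ pf ∈ (PySem.Dict.ofList d).items, ∀ f ∈ pf.2, (PySem.Dict.ofList d).contains f = true
instance (d : List (String × List String)) : Decidable (Pre_friendsOfFriends d) := by
  unfold Pre_friendsOfFriends; infer_instance

def pvWitness_friendsOfFriends : (List (String × List String)) :=
  [("a", ["b", "c"]), ("b", ["c"]), ("c", [])]

def Spec_friendsOfFriends (d : List (String × List String)) (out : List (String × List String)) : Prop := out = friendsOfFriends_alt d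
instance (d : List (String × List String)) (out : List (String × List String)) : Decidable (Spec_friendsOfFriends d out) := by unfold Spec_friendsOfFriends; infer_instance

-- ===== CLAIM (what is proved, stated in full; the proofs are below) =====
def Claim_equal_friendsOfFriends : Prop := ∀ (d : List (String × List String)), Dom_friendsOfFriends d → Pre_friendsOfFriends d → Spec_friendsOfFriends d (friendsOfFriends d)

-- ===== LEMMAS AND PROOFS =====

-- the list of elements a BFS round discovers: elements of xs not yet in V, first occurrences, in order
def pvNew (V : PySem.Set String) (xs : List String) : List String :=
  match xs with
  | [] => []
  | x :: xs => if V.contains x then pvNew V xs else x :: pvNew (V.add x) xs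

lemma pvNew_nil (V : PySem.Set String) : pvNew V [] = [] := rfl

lemma pvNew_cons (V : PySem.Set String) (x : String) (xs : List String) :
    pvNew V (x :: xs) = if V.contains x then pvNew V xs else x :: pvNew (V.add x) xs := rfl

-- A's per-person loop, abstracted: fold of set-updates with the filtered neighbour lists
def pvF (g : String → List String) (r : String → Bool) (S : PySem.Set String)
    (l : List String) : PySem.Set String :=
  l.foldl (fun s f => PySem.Set.update s ((g f).filter r)) S

-- filter commutes with set-of-list
lemma pv_filter_ofList {α : Type} [BEq α] [LawfulBEq α] (p : α → Bool) (xs : List α) :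
    (PySem.Set.ofList xs).filter p = PySem.Set.ofList (xs.filter p) := by
  induction xs with
  | nil => rfl
  | cons x xs ih =>
    rw [PySem.Set.ofList_cons]
    cases hp : p x with
    | false =>
      rw [List.filter_cons_of_neg (by simp [hp]), List.filter_cons_of_neg (by simp [hp])]
      simp only [PySem.Set.discard, List.filter_filter]
      rw [show (fun a => p a && !(a == x)) = p from ?_, ih]
      funext a
      by_cases hax : a = x
      · subst hax; simp [hp]
      · simp [hax]
    | true =>
      rw [List.filter_cons_of_pos (by simp [hp]), List.filter_cons_of_pos (by simp [hp]),
        PySem.Set.ofList_cons, ← ih]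
      simp only [PySem.Set.discard, List.filter_filter, Bool.and_comm]

-- pvNew is the deduplicated filtered list
lemma pv_contains_eq (W : PySem.Set String) (a : String) : W.contains a = decide (a ∈ W) := by
  by_cases h : a ∈ W
  · simp only [h, decide_true]
    exact (PySem.Set.contains_iff W a).mpr h
  · cases hc : W.contains a
    · simp [h]
    · exact absurd ((PySem.Set.contains_iff W a).mp hc) h

lemma pvNew_eq (V : PySem.Set String) (xs : List String) :
    pvNew V xs = PySem.Set.ofList (xs.filter (fun y => !(PySem.Set.contains V y))) := by
  induction xs generalizing V with
  | nil => rfl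
  | cons x xs ih =>
    rw [pvNew_cons]
    by_cases h : V.contains x = true
    · rw [if_pos h, List.filter_cons_of_neg (by simp only [h, Bool.not_true]; exact Bool.false_ne_true), ih]
    · rw [if_neg h, List.filter_cons_of_pos (by rw [Bool.not_eq_true']; exact Bool.eq_false_iff.mpr h), PySem.Set.ofList_cons]
      congr 1
      rw [ih]
      show _ = (PySem.Set.ofList (xs.filter (fun y => !(PySem.Set.contains V y)))).filter
        (fun a => !(a == x))
      rw [pv_filter_ofList, List.filter_filter]
      congr 1
      apply List.filter_congr
      intro a _
      by_cases h1 : a ∈ V <;> by_cases h2 : a = x <;>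
        simp [pv_contains_eq, PySem.Set.mem_add, h1, h2]

lemma pv_update_of_subset (S : PySem.Set String) (xs : List String)
    (h : ∀ a ∈ xs, a ∈ S) : S.update xs = S := by
  rw [PySem.Set.update_eq_append_filter]
  have hnil : List.filter (fun y => !S.contains y) (PySem.Set.ofList xs) = [] := by
    rw [List.filter_eq_nil_iff]
    intro a ha
    simp [h a ((PySem.Set.mem_ofList xs a).mp ha)]
  rw [hnil, List.append_nil]

-- one BFS scan of a neighbour list, from state (visited, out)
lemma pv_inner (xs : List String)
    (V : PySem.Set String) (out : List String) :
    xs.foldl (fun (st3 : PySem.Set String × List String) v =>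
        if st3.1.contains v then st3
        else (PySem.Set.add st3.1 v, st3.2 ++ [v])) (V, out)
      = (V.update xs, out ++ pvNew V xs) := by
  induction xs generalizing V out with
  | nil => simp [pvNew_nil, PySem.Set.update_nil]
  | cons x xs ih =>
    rw [List.foldl_cons, PySem.Set.update_cons, pvNew_cons]
    by_cases h : V.contains x = true
    · rw [if_pos h, if_pos h, ih V out,
        PySem.Set.add_of_mem ((PySem.Set.contains_iff V x).mp h)]
    · rw [if_neg h, if_neg h, ih (V.add x) (out ++ [x]), List.append_assoc]
      rfl

lemma pvNew_append (V : PySem.Set String) (xs ys : List String) :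
    pvNew V (xs ++ ys) = pvNew V xs ++ pvNew (V.update xs) ys := by
  induction xs generalizing V with
  | nil => simp [pvNew, PySem.Set.update_nil]
  | cons x xs ih =>
    by_cases h : V.contains x = true
    · rw [List.cons_append, pvNew_cons, pvNew_cons, if_pos h, if_pos h,
        PySem.Set.update_cons, PySem.Set.add_of_mem ((PySem.Set.contains_iff V x).mp h)]
      exact ih V
    · rw [List.cons_append, pvNew_cons, pvNew_cons, if_neg h, if_neg h,
        PySem.Set.update_cons, ih (V.add x), List.cons_append]

-- one whole BFS round: scanning the frontier l appends the newly discovered nodes in order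
lemma pv_level (D : PySem.Dict String (List String)) (l : List String)
    (V : PySem.Set String) (out : List String) :
    l.foldl (fun (st2 : PySem.Set String × List String) u =>
        (D.getD u []).foldl (fun (st3 : PySem.Set String × List String) v =>
            if st3.1.contains v then st3
            else (PySem.Set.add st3.1 v, st3.2 ++ [v])) st2) (V, out)
      = (V.update (l.flatMap (fun u => D.getD u [])),
         out ++ pvNew V (l.flatMap (fun u => D.getD u []))) := by
  induction l generalizing V out with
  | nil => simp [pvNew, PySem.Set.update_nil]
  | cons u l ih =>
    rw [List.foldl_cons, pv_inner, ih, List.flatMap_cons, PySem.Set.update_append,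
      pvNew_append, List.append_assoc]

-- the outer loop 'for f in fs: s.update(filtered d[f])' is one big update
lemma pv_foldl_update {α β : Type} [BEq α] [LawfulBEq α] (g : β → List α) (q : α → Bool)
    (l : List β) (s : PySem.Set α) :
    l.foldl (fun s f => PySem.Set.update s ((g f).filter q)) s
      = PySem.Set.update s ((l.flatMap g).filter q) := by
  induction l generalizing s with
  | nil => simp [PySem.Set.update_nil]
  | cons f l ih =>
    simp only [List.foldl_cons, List.flatMap_cons, List.filter_append,
      PySem.Set.update_append, ih]

-- occurrences of x in the scanned list are absorbed once its (filtered) neighbours are present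
lemma pv_absorb (g : String → List String) (r : String → Bool) (x : String) :
    ∀ (l : List String) (S : PySem.Set String),
      (∀ a ∈ (g x).filter r, a ∈ S) →
      pvF g r S l = pvF g r S (l.filter (fun y => !(y == x))) := by
  intro l
  induction l with
  | nil => intro S _; rfl
  | cons y l ih =>
    intro S hS
    by_cases hyx : y = x
    · subst hyx
      rw [List.filter_cons_of_neg (by simp)]
      show pvF g r (S.update ((g y).filter r)) l = _
      rw [pv_update_of_subset S _ hS]
      exact ih S hS
    · rw [List.filter_cons_of_pos (by simp [hyx])]
      show pvF g r (S.update ((g y).filter r)) l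
        = pvF g r (S.update ((g y).filter r)) (l.filter (fun y => !(y == x)))
      exact ih _ (fun a ha => (PySem.Set.mem_update _ _ _).mpr (Or.inl (hS a ha)))

-- scanning the deduplicated frontier gives the same set as scanning the raw list
lemma pv_dedup (g : String → List String) (r : String → Bool) :
    ∀ (n : Nat) (l : List String) (S : PySem.Set String), l.length ≤ n →
      pvF g r S (PySem.Set.ofList l) = pvF g r S l := by
  intro n
  induction n with
  | zero =>
    intro l S hl
    rw [List.length_eq_zero_iff.mp (Nat.le_zero.mp hl)]
    rfl
  | succ n ih =>
    intro l S hl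
    match l with
    | [] => rfl
    | x :: l =>
      rw [PySem.Set.ofList_cons]
      show pvF g r (S.update ((g x).filter r)) ((PySem.Set.ofList l).discard x)
        = pvF g r (S.update ((g x).filter r)) l
      have hd : (PySem.Set.ofList l).discard x
          = PySem.Set.ofList (l.filter (fun y => !(y == x))) := by
        show (PySem.Set.ofList l).filter (fun y => !(y == x)) = _
        exact pv_filter_ofList _ l
      rw [hd, ih (l.filter (fun y => !(y == x))) _
        (le_trans (List.length_filter_le _ _) (Nat.le_of_succ_le_succ hl)),
        ← pv_absorb g r x l _ (fun a ha => (PySem.Set.mem_update _ _ _).mpr (Or.inr ha))]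

-- items of a fold of inserts of fresh distinct keys
lemma pv_items_foldl_insert {κ ν : Type} [BEq κ] [LawfulBEq κ] (F : κ → ν)
    (l : List κ) (acc : PySem.Dict κ ν) (hnd : l.Nodup)
    (hfresh : ∀ k ∈ l, acc.contains k = false) :
    (l.foldl (fun a k => a.insert k (F k)) acc).items
      = acc.items ++ l.map (fun k => (k, F k)) := by
  induction l generalizing acc with
  | nil => simp
  | cons k l ih =>
    simp only [List.foldl_cons, List.map_cons]
    have h2 : ∀ k' ∈ l, (acc.insert k (F k)).contains k' = false := by
      intro k' hk'
      rw [PySem.Dict.contains_insert]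
      have hne : k' ≠ k := fun he => (List.nodup_cons.mp hnd).1 (he ▸ hk')
      simp [hne, hfresh k' (List.mem_cons_of_mem _ hk')]
    rw [ih _ (List.Nodup.of_cons hnd) h2,
      PySem.Dict.items_insert, hfresh k (by simp), if_neg (by simp)]
    simp

-- per person: A's filtered-union set equals the set of B's level-2 BFS frontier
lemma pv_bfs_eq (D : PySem.Dict String (List String)) (p : String) :
    (D.getD p []).foldl (fun s f =>
        (D.getD f []).foldl (fun s x =>
            if x ≠ p ∧ x ∉ (D.getD p []) then PySem.Set.add s x else s) s)
      PySem.Set.empty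
    = PySem.Set.ofList
        (((PySem.List.pyRange 0 2 1).foldl (fun (st : PySem.Set String × List String) _ =>
            st.2.foldl (fun (st2 : PySem.Set String × List String) u =>
                (D.getD u []).foldl (fun (st3 : PySem.Set String × List String) v =>
                    if st3.1.contains v then st3
                    else (PySem.Set.add st3.1 v, st3.2 ++ [v])) st2)
              (st.1, ([] : List String)))
          (PySem.Set.add PySem.Set.empty p, [p])).2) := by
  set g : String → List String := fun u => D.getD u [] with hg
  set fs : List String := g p with hfs
  -- the per-element predicates: A's inline filter, and 'not yet visited after level 1'
  set V0 : PySem.Set String := PySem.Set.add PySem.Set.empty p with hV0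
  set V1 : PySem.Set String := V0.update fs with hV1
  set r : String → Bool := fun y => !(PySem.Set.contains V1 y) with hr
  -- evaluate B: two rounds
  have hrange : PySem.List.pyRange 0 2 1 = [0, 1] := by decide
  have hB :
      (((PySem.List.pyRange 0 2 1).foldl (fun (st : PySem.Set String × List String) _ =>
          st.2.foldl (fun (st2 : PySem.Set String × List String) u =>
              (D.getD u []).foldl (fun (st3 : PySem.Set String × List String) v =>
                  if st3.1.contains v then st3
                  else (PySem.Set.add st3.1 v, st3.2 ++ [v])) st2)
            (st.1, ([] : List String)))
        (PySem.Set.add PySem.Set.empty p, [p])).2)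
      = pvNew V1 ((pvNew V0 fs).flatMap g) := by
    rw [hrange]
    simp only [List.foldl_cons, List.foldl_nil]
    rw [pv_inner]
    simp only [List.nil_append]
    rw [pv_level D]
    rfl
  rw [hB]
  -- A's side as a fold of updates with the filter r
  have hq : ∀ (s : PySem.Set String) (f : String),
      (g f).foldl (fun s x =>
          if x ≠ p ∧ x ∉ fs then PySem.Set.add s x else s) s
        = PySem.Set.update s ((g f).filter r) := by
    intro s f
    rw [PySem.List.foldl_ite_eq_foldl_filter (p := fun x => x ≠ p ∧ x ∉ fs)]
    have : (fun x => decide (x ≠ p ∧ x ∉ fs)) = r := by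
      funext a
      by_cases hap : a = p <;> by_cases haf : a ∈ fs <;>
        simp [hap, haf, hr, pv_contains_eq, hV1, PySem.Set.mem_update, hV0, PySem.Set.mem_add]
    rw [this]
    rfl
  have hA : fs.foldl (fun s f =>
        (g f).foldl (fun s x =>
            if x ≠ p ∧ x ∉ fs then PySem.Set.add s x else s) s) PySem.Set.empty
      = pvF g r PySem.Set.empty fs := by
    exact PySem.List.foldl_congr_mem _ _ _ _ (fun s f _ => hq s f)
  rw [show (D.getD p []) = fs from rfl]  -- align with the set-abbreviations
  rw [hA]
  -- B's final frontier is a pvF as well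
  have hfr1 : pvNew V0 fs = PySem.Set.ofList (fs.filter (fun y => !(y == p))) := by
    rw [pvNew_eq]
    congr 1
    apply List.filter_congr
    intro a _
    by_cases hap : a = p <;>
      simp [hap, hV0, PySem.Set.empty]
  have hB2 : pvNew V1 ((pvNew V0 fs).flatMap g)
      = pvF g r PySem.Set.empty (pvNew V0 fs) := by
    rw [pvNew_eq, ← PySem.Set.update_nil_left, ← pv_foldl_update g (fun y => !(PySem.Set.contains V1 y))]
    rfl
  rw [hB2, hfr1, pv_dedup g r (fs.filter (fun y => !(y == p))).length _ _ le_rfl,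
    ← pv_absorb g r p fs PySem.Set.empty (by
      intro a ha
      exfalso
      have ha' := List.of_mem_filter ha
      have ham := List.mem_of_mem_filter ha
      rw [hr] at ha'
      have hmV : a ∈ V1 := by
        rw [hV1]
        exact (PySem.Set.mem_update _ _ _).mpr (Or.inr ham)
      simp [hmV] at ha')]
  have hofl : pvF g r PySem.Set.empty fs = PySem.Set.ofList ((fs.flatMap g).filter r) := by
    show fs.foldl _ _ = _
    rw [pv_foldl_update g r]
    exact PySem.Set.update_nil_left _
  rw [hofl, PySem.Set.ofList_ofList]

-- ===== VERDICT (by name: the statement is the Claim_ definition above) =====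
theorem friendsOfFriends_spec : Claim_equal_friendsOfFriends := by
  intro d _ _
  unfold Spec_friendsOfFriends friendsOfFriends friendsOfFriends_alt
  set D := PySem.Dict.ofList d with hD
  rw [pv_items_foldl_insert _ _ _ (PySem.Dict.nodup_keys_ofList d) (fun k _ => rfl)]
  show PySem.Dict.empty.items ++ D.keys.map _ = D.keys.map _
  rw [show (PySem.Dict.empty : PySem.Dict String (List String)).items = [] from rfl,
    List.nil_append]
  apply List.map_congr_left
  intro p _
  exact congrArg (Prod.mk p) (pv_bfs_eq D p)
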